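-- pv_equiv track=rewrite | github.com/Haell39/Python | College/DSA/Insetion sort.py | insertion_sort_simulation
-- ===== SOURCE A (Python) =====
-- def insertion_sort_simulation(arr):
--     simulation = []
--     for i in range(1, len(arr)):
--         key = arr[i]
--         j = i - 1
--
--         # Registra o estado antes de começar a inserção desse krai
--         simulation.append(arr[:])
--
--         # Move os elementos
--         while j >= 0 and arr[j] > key:
--             arr[j + 1] = arr[j]
--             j -= 1
--
--         arr[j + 1] = key
--
--         # Registra o estado após a inserção
--         simulation.append(arr[:])
--
--     return simulation
-- ===== SOURCE B (Python) =====
-- def insertion_sort_simulation(arr):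
--     simulation = []
--     for i in range(1, len(arr)):
--         simulation.append(arr[:])
--         key = arr[i]
--         # binary search for the insertion point in the sorted prefix arr[:i]
--         lo, hi = 0, i
--         while lo < hi:
--             mid = (lo + hi) // 2
--             if key < arr[mid]:
--                 hi = mid
--             else:
--                 lo = mid + 1
--         # block-move the tail of the prefix right by one and drop in the key
--         arr[lo + 1:i + 1] = arr[lo:i]
--         arr[lo] = key
--         simulation.append(arr[:])
--     return simulation
-- ===== Notes on version B (the rewrite author's own statement) =====
-- stated objective: alternative
-- what changed: Replaces the linear shift-one-at-a-time while loop with a hand-written binary search for the insertion point in the sorted prefix followed by a single block move (slice assignment), i.e. binary insertion sort; snapshots and in-place mutation are identical.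
import Mathlib
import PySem

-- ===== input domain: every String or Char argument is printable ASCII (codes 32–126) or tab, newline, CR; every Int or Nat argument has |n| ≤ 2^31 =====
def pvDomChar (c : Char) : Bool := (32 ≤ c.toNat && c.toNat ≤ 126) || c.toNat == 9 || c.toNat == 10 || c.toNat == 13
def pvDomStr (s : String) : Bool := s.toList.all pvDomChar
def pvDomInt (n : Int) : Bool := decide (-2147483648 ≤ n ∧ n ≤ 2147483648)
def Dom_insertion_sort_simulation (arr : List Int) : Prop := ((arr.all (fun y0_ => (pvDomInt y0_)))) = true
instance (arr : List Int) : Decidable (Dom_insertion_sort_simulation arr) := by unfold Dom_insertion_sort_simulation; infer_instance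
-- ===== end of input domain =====

-- B replaces A's element-by-element shift loop with a binary search for the insertion
-- point plus one block move (binary insertion sort); both A and B mutate the Python list
-- `arr` in place in the same way, and the equivalence proved here is about the returned
-- list of snapshots.

-- ===== PORT A =====
-- inner while loop of A:  while j >= 0 and arr[j] > key: arr[j+1] = arr[j]; j -= 1
-- followed by  arr[j+1] = key   (all indices accessed are in range when A runs)
def pvShiftA (arr : List Int) (key : Int) (j : Int) : List Int :=
  if h : 0 ≤ j ∧ PySem.List.pyGetD arr j 0 > key then
    pvShiftA (arr.set (j + 1).toNat (PySem.List.pyGetD arr j 0)) key (j - 1)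
  else
    arr.set (j + 1).toNat key
termination_by (j + 1).toNat
decreasing_by omega

-- for i in range(1, len(arr)): key = arr[i]; simulation.append(arr[:]); <shift>; simulation.append(arr[:])
def pvOuterA (arr : List Int) (sim : List (List Int)) (i n : Nat) : List (List Int) :=
  if i < n then
    let key := PySem.List.pyGetD arr (i : Int) 0
    let sim' := sim ++ [arr]
    let arr' := pvShiftA arr key ((i : Int) - 1)
    pvOuterA arr' (sim' ++ [arr']) (i + 1) n
  else sim
termination_by n - i

def insertion_sort_simulation (arr : List Int) : List (List Int) :=
  pvOuterA arr [] 1 arr.length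

-- ===== PORT B =====
-- B's hand-written binary search:  lo, hi = 0, i; while lo < hi: mid = (lo+hi)//2; ...
def pvBisect (arr : List Int) (key : Int) (lo hi : Nat) : Nat :=
  if lo < hi then
    let mid := (lo + hi) / 2
    if key < PySem.List.pyGetD arr (mid : Int) 0 then
      pvBisect arr key lo mid
    else
      pvBisect arr key (mid + 1) hi
  else lo
termination_by hi - lo
decreasing_by all_goals omega

-- one iteration of B's loop body after the first snapshot:
-- key = arr[i]; <binary search>; arr[lo+1:i+1] = arr[lo:i]; arr[lo] = key
def pvStepB (arr : List Int) (i : Nat) : List Int :=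
  let key := PySem.List.pyGetD arr (i : Int) 0
  let pos := pvBisect arr key 0 i
  let arr2 := arr.take (pos + 1) ++ PySem.List.slice arr (some (pos : Int)) (some (i : Int)) ++ arr.drop (i + 1)
  arr2.set pos key

def pvOuterB (arr : List Int) (sim : List (List Int)) (i n : Nat) : List (List Int) :=
  if i < n then
    let sim' := sim ++ [arr]
    let arr' := pvStepB arr i
    pvOuterB arr' (sim' ++ [arr']) (i + 1) n
  else sim
termination_by n - i

def insertion_sort_simulation_alt (arr : List Int) : List (List Int) :=
  pvOuterB arr [] 1 arr.length

-- ===== PRECONDITION & SPEC =====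
def Spec_insertion_sort_simulation (arr : List Int) (out : List (List Int)) : Prop := out = insertion_sort_simulation_alt arr
instance (arr : List Int) (out : List (List Int)) : Decidable (Spec_insertion_sort_simulation arr out) := by unfold Spec_insertion_sort_simulation; infer_instance

-- ===== CLAIM (what is proved, stated in full; the proofs are below) =====
def Claim_equal_insertion_sort_simulation : Prop := ∀ (arr : List Int), Dom_insertion_sort_simulation arr → Spec_insertion_sort_simulation arr (insertion_sort_simulation arr)

-- ===== LEMMAS AND PROOFS =====

-- sortedness of the first n positions, read through getD
def pvSP (n : Nat) (arr : List Int) : Prop :=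
  ∀ a b : Nat, a ≤ b → b < n → arr.getD a 0 ≤ arr.getD b 0

-- the common result of one insertion step: key inserted at position p, block moved right
def pvCanon (arr : List Int) (key : Int) (p i : Nat) : List Int :=
  arr.take p ++ key :: ((arr.drop p).take (i - p) ++ arr.drop (i + 1))

theorem pvGetD_set_ne (l : List Int) (n k : Nat) (v : Int) (h : k ≠ n) :
    (l.set n v).getD k 0 = l.getD k 0 := by
  rw [List.getD_eq_getElem?_getD, List.getD_eq_getElem?_getD, List.getElem?_set]
  simp [Ne.symm h]

theorem pvBisect_spec (arr : List Int) (key : Int) (i : Nat) (hs : pvSP i arr)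
    (_hil : i ≤ arr.length) :
    ∀ d lo hi, hi - lo = d → lo ≤ hi → hi ≤ i →
      (∀ k, k < lo → arr.getD k 0 ≤ key) →
      (∀ k, hi ≤ k → k < i → key < arr.getD k 0) →
      (∀ k, k < pvBisect arr key lo hi → arr.getD k 0 ≤ key) ∧
      (∀ k, pvBisect arr key lo hi ≤ k → k < i → key < arr.getD k 0) ∧
      pvBisect arr key lo hi ≤ i := by
  intro d
  induction d using Nat.strong_induction_on with
  | _ d ih =>
    intro lo hi hd hlohi hhi hlo hhigh
    rw [pvBisect]
    by_cases hlt : lo < hi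
    · simp only [if_pos hlt, PySem.List.pyGetD_natCast]
      by_cases hc : key < arr.getD ((lo + hi) / 2) 0
      · simp only [if_pos hc]
        exact ih ((lo + hi) / 2 - lo) (by omega) lo ((lo + hi) / 2) rfl (by omega) (by omega)
          hlo (fun k hk1 hk2 => lt_of_lt_of_le hc (hs _ k hk1 hk2))
      · simp only [if_neg hc]
        exact ih (hi - ((lo + hi) / 2 + 1)) (by omega) ((lo + hi) / 2 + 1) hi rfl (by omega) hhi
          (fun k hk => le_trans (hs k _ (by omega) (by omega)) (not_lt.mp hc)) hhigh
    · simp only [if_neg hlt]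
      exact ⟨hlo, fun k hk1 hk2 => hhigh k (by omega) hk2, by omega⟩

theorem pvShiftA_eq (key : Int) :
    ∀ (jn : Nat) (arr : List Int) (p : Nat), jn < arr.length → p ≤ jn →
      (∀ k, k < p → arr.getD k 0 ≤ key) →
      (∀ k, p ≤ k → k < jn → key < arr.getD k 0) →
      pvShiftA arr key ((jn : Int) - 1) = pvCanon arr key p jn := by
  intro jn
  induction jn with
  | zero =>
    intro arr p hlen hp _ _
    have hp0 : p = 0 := by omega
    subst hp0
    have h0 : ((0 : Nat) : Int) - 1 = -1 := by norm_num
    rw [h0, pvShiftA, dif_neg (by norm_num)]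
    have h1 : ((-1 : Int) + 1).toNat = 0 := by norm_num
    rw [h1, List.set_eq_take_append_cons_drop, if_pos (by omega)]
    simp [pvCanon]
  | succ m ih =>
    intro arr p hlen hp hle hgt
    have hj : ((m + 1 : Nat) : Int) - 1 = (m : Int) := by push_cast; ring
    rw [hj, pvShiftA]
    have htn : ((m : Int) + 1).toNat = m + 1 := by omega
    by_cases hpc : p = m + 1
    · subst hpc
      have hlem : arr.getD m 0 ≤ key := hle m (by omega)
      rw [dif_neg (by
        rw [PySem.List.pyGetD_natCast]
        intro hco
        exact absurd hco.2 (not_lt.mpr hlem))]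
      rw [htn, List.set_eq_take_append_cons_drop, if_pos hlen]
      simp [pvCanon]
    · have hpm : p ≤ m := by omega
      have hgtm : key < arr.getD m 0 := hgt m hpm (by omega)
      rw [dif_pos (by
        refine ⟨by positivity, ?_⟩
        rw [PySem.List.pyGetD_natCast]
        exact hgtm)]
      rw [PySem.List.pyGetD_natCast, htn]
      have hih := ih (arr.set (m + 1) (arr.getD m 0)) p
        (by rw [List.length_set]; omega) hpm
        (fun k hk => by rw [pvGetD_set_ne _ _ _ _ (by omega)]; exact hle k hk)
        (fun k hk1 hk2 => by rw [pvGetD_set_ne _ _ _ _ (by omega)]; exact hgt k hk1 (by omega))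
      rw [hih]
      -- now:  pvCanon (arr.set (m+1) v) key p m = pvCanon arr key p (m+1),  v = arr.getD m 0
      have hset : arr.set (m + 1) (arr.getD m 0)
          = arr.take (m + 1) ++ arr.getD m 0 :: arr.drop (m + 2) := by
        rw [List.set_eq_take_append_cons_drop, if_pos hlen]
      have hltk : (arr.take (m + 1)).length = m + 1 := by rw [List.length_take]; omega
      unfold pvCanon
      rw [hset]
      rw [List.take_append_of_le_length (by omega), List.take_take,
        Nat.min_eq_left (by omega)]
      rw [List.drop_append_of_le_length (by omega), List.drop_take]
      rw [List.take_append_of_le_length (by rw [List.length_take, List.length_drop]; omega),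
        List.take_take, Nat.min_eq_left (by omega)]
      have hdropall : (arr.take (m + 1)).drop (m + 1) = [] := by
        rw [List.drop_take]; simp
      rw [List.drop_append_of_le_length (by omega), hdropall, List.nil_append]
      -- remaining: take (m-p) (drop p) ++ v :: drop (m+2)  =  take (m+1-p) (drop p) ++ drop (m+2)
      have hsucc : m + 1 - p = (m - p) + 1 := by omega
      rw [hsucc, List.take_add_one]
      have hget : (arr.drop p)[m - p]? = some (arr.getD m 0) := by
        rw [List.getElem?_drop]
        have : p + (m - p) = m := by omega
        rw [this, List.getElem?_eq_getElem (by omega), List.getD_eq_getElem _ _ (by omega)]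
      rw [hget]
      simp

theorem pvStepB_eq (arr : List Int) (i : Nat) (h : i < arr.length)
    (hp : pvBisect arr (arr.getD i 0) 0 i ≤ i) :
    pvStepB arr i = pvCanon arr (arr.getD i 0) (pvBisect arr (arr.getD i 0) 0 i) i := by
  simp only [pvStepB, PySem.List.pyGetD_natCast, PySem.List.slice_natCast]
  set p := pvBisect arr (arr.getD i 0) 0 i with hpdef
  have hpl : p < arr.length := by omega
  have hlp : (arr.take p).length = p := by rw [List.length_take]; omega
  have htake : arr.take (p + 1) = arr.take p ++ [arr[p]] := by
    rw [List.take_add_one, List.getElem?_eq_getElem hpl]; rfl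
  rw [htake]
  simp only [List.append_assoc, List.singleton_append]
  rw [List.set_append_right _ _ (le_of_eq hlp), hlp, Nat.sub_self]
  unfold pvCanon
  rfl

theorem pvCanon_length (arr : List Int) (key : Int) (p i : Nat) (hp : p ≤ i)
    (hi : i < arr.length) : (pvCanon arr key p i).length = arr.length := by
  simp [pvCanon]
  omega

theorem pvCanon_getD (arr : List Int) (key : Int) (p i : Nat) (hp : p ≤ i)
    (hi : i < arr.length) (k : Nat) :
    (pvCanon arr key p i).getD k 0 =
      if k < p then arr.getD k 0
      else if k = p then key
      else if k ≤ i then arr.getD (k - 1) 0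
      else arr.getD k 0 := by
  have hlp : (arr.take p).length = p := by rw [List.length_take]; omega
  have hlm : ((arr.drop p).take (i - p)).length = i - p := by
    rw [List.length_take, List.length_drop]; omega
  unfold pvCanon
  rw [List.getD_eq_getElem?_getD, List.getElem?_append, hlp]
  by_cases h1 : k < p
  · rw [if_pos h1, List.getElem?_take, if_pos h1, if_pos h1, List.getD_eq_getElem?_getD]
  · rw [if_neg h1, if_neg h1]
    by_cases h2 : k = p
    · subst h2
      rw [Nat.sub_self]
      simp
    · have h3 : k - p = (k - p - 1) + 1 := by omega
      rw [h3, List.getElem?_cons_succ, List.getElem?_append, hlm, if_neg h2]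
      by_cases h4 : k - p - 1 < i - p
      · rw [if_pos h4, List.getElem?_take, if_pos h4, List.getElem?_drop]
        have h5 : p + (k - p - 1) = k - 1 := by omega
        rw [h5, if_pos (by omega), List.getD_eq_getElem?_getD]
      · rw [if_neg h4, List.getElem?_drop]
        have h5 : i + 1 + (k - p - 1 - (i - p)) = k := by omega
        rw [h5, if_neg (by omega), List.getD_eq_getElem?_getD]

theorem pvCanon_SP (arr : List Int) (key : Int) (p i : Nat) (hp : p ≤ i)
    (hi : i < arr.length) (hs : pvSP i arr)
    (hA : ∀ k, k < p → arr.getD k 0 ≤ key)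
    (hB : ∀ k, p ≤ k → k < i → key < arr.getD k 0) :
    pvSP (i + 1) (pvCanon arr key p i) := by
  intro a b hab hb
  rw [pvCanon_getD arr key p i hp hi a, pvCanon_getD arr key p i hp hi b]
  split_ifs <;>
    first
      | (exfalso; omega)
      | exact le_refl _
      | exact hs _ _ (by omega) (by omega)
      | exact hA _ (by omega)
      | exact (hB _ (by omega) (by omega)).le

theorem pvOuter_eq : ∀ (d : Nat) (arr : List Int) (sim : List (List Int)) (i : Nat),
    pvSP i arr → d = arr.length - i →
    pvOuterA arr sim i arr.length = pvOuterB arr sim i arr.length := by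
  intro d
  induction d using Nat.strong_induction_on with
  | _ d ih =>
    intro arr sim i hs hd
    rw [pvOuterA, pvOuterB]
    by_cases h : i < arr.length
    · simp only [if_pos h]
      obtain ⟨hA, hB, hpi⟩ := pvBisect_spec arr (arr.getD i 0) i hs (le_of_lt h)
        (i - 0) 0 i rfl (by omega) (le_refl i)
        (fun k hk => absurd hk (Nat.not_lt_zero k))
        (fun k hk1 hk2 => absurd hk2 (by omega))
      have hshift : pvShiftA arr (PySem.List.pyGetD arr (i : Int) 0) ((i : Int) - 1)
          = pvCanon arr (arr.getD i 0) (pvBisect arr (arr.getD i 0) 0 i) i := by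
        rw [PySem.List.pyGetD_natCast]
        exact pvShiftA_eq _ i arr _ h hpi hA hB
      have hstep : pvStepB arr i
          = pvCanon arr (arr.getD i 0) (pvBisect arr (arr.getD i 0) 0 i) i :=
        pvStepB_eq arr i h hpi
      rw [hshift, hstep]
      have hCl : (pvCanon arr (arr.getD i 0) (pvBisect arr (arr.getD i 0) 0 i) i).length
          = arr.length := pvCanon_length _ _ _ _ hpi h
      have hCs : pvSP (i + 1) (pvCanon arr (arr.getD i 0) (pvBisect arr (arr.getD i 0) 0 i) i) :=
        pvCanon_SP _ _ _ _ hpi h hs hA hB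
      rw [← hCl]
      exact ih (arr.length - (i + 1)) (by omega) _ _ (i + 1) hCs (by omega)
    · simp only [if_neg h]

-- ===== VERDICT (by name: the statement is the Claim_ definition above) =====
theorem insertion_sort_simulation_spec : Claim_equal_insertion_sort_simulation := by
  intro arr _
  unfold Spec_insertion_sort_simulation insertion_sort_simulation insertion_sort_simulation_alt
  exact pvOuter_eq (arr.length - 1) arr [] 1
    (by intro a b hab hb
        have : a = b := by omega
        rw [this]) rfl
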